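-- pv_equiv track=rewrite | github.com/kevinngzh/advent-of-code-2020 | advent_of_code_2020/day05/__init__.py | binary_search_str
-- ===== SOURCE A (Python) =====
-- def binary_search_str(str_, halves):
--     search_space = list(range(2 ** len(str_)))
--
--     for char in str_:
--         half = int(len(search_space) / 2)
--
--         if char == halves[0]:
--             search_space = search_space[:half]
--         elif char == halves[1]:
--             search_space = search_space[half:]
--         else:
--             raise ValueError
--
--     assert len(search_space) == 1
--
--     return search_space[0]
-- ===== SOURCE B (Python) =====
-- def binary_search_str(str_, halves):
--     # Accumulate the bits directly: each "lower half" char is a 0 bit, each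
--     # "upper half" char a 1 bit; no 2**n list is ever materialised.
--     result = 0
--     for char in str_:
--         if char == halves[0]:
--             result = result * 2
--         elif char == halves[1]:
--             result = result * 2 + 1
--         else:
--             raise ValueError
--     return result
-- ===== Notes on version B (the rewrite author's own statement) =====
-- stated objective: faster
-- what changed: B accumulates the index as bits (result = result*2 + (char is the upper-half letter)) instead of materialising a list of 2**len(str_) integers and repeatedly slicing it in half.
import Mathlib
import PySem

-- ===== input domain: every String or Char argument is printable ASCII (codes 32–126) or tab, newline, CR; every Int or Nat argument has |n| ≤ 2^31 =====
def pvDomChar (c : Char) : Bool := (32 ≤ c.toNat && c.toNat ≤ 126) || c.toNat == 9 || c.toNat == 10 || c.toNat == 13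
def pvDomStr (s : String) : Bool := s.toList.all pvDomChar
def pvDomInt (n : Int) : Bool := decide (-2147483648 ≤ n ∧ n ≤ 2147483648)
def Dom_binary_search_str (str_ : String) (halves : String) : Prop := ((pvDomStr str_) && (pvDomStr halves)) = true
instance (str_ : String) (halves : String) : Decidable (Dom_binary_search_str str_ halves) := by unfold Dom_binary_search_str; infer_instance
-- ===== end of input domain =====

-- B replaces A's exponential halving of a materialised list(range(2**n)) by a linear
-- bit accumulation; equivalence is proved on Pre_ (exactly the inputs where A returns).

-- ===== PORT A =====
-- A's for-loop over str_; state = search_space; Option, none = the raise paths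
-- (IndexError on halves[0]/halves[1], ValueError on an unexpected char).
def aLoop (chars : List Char) (halves : String) (ss : List Int) : Option (List Int) :=
  match chars with
  | [] => some ss
  | c :: rest =>
    -- half = int(len(search_space)/2): the reachable lengths are powers of two,
    -- so CPython's float division then int() is exactly Nat halving here
    let half : Nat := ss.length / 2
    match PySem.Str.pyGet? halves 0 with
    | none => none
    | some h0 =>
      if c = h0 then aLoop rest halves (PySem.List.slice ss none (some (half : Int)))
      else
        match PySem.Str.pyGet? halves 1 with
        | none => none
        | some h1 =>
          if c = h1 then aLoop rest halves (PySem.List.slice ss (some (half : Int)) none)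
          else none

def binary_search_str (str_ : String) (halves : String) : Int :=
  match aLoop str_.toList halves (PySem.List.pyRange 0 ((2 : Int) ^ str_.toList.length) 1) with
  | some ss => (PySem.List.pyGet? ss 0).getD 0   -- assert len == 1; return search_space[0] (Pre_ guarantees a singleton)
  | none => 0                                    -- exception path, excluded by Pre_

-- ===== PORT B =====
def bLoop (chars : List Char) (halves : String) (result : Int) : Int :=
  match chars with
  | [] => result
  | c :: rest =>
    match PySem.Str.pyGet? halves 0 with
    | none => 0                                  -- IndexError path, excluded by Pre_
    | some h0 =>
      if c = h0 then bLoop rest halves (result * 2)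
      else
        match PySem.Str.pyGet? halves 1 with
        | none => 0
        | some h1 =>
          if c = h1 then bLoop rest halves (result * 2 + 1)
          else 0                                 -- ValueError path, excluded by Pre_

def binary_search_str_alt (str_ : String) (halves : String) : Int :=
  bLoop str_.toList halves 0

-- ===== PRECONDITION & SPEC =====
-- Pre_: exactly the inputs where A returns normally — every character of str_ is
-- halves[0], or (halves has a second character and it is halves[1]); otherwise A
-- raises IndexError or ValueError.
def Pre_binary_search_str (str_ : String) (halves : String) : Prop :=
  (str_.toList.all (fun c =>
      (decide (1 ≤ halves.toList.length) && c == halves.toList.headD ' ') ||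
      (decide (2 ≤ halves.toList.length) && c == halves.toList.getD 1 ' '))) = true
instance (str_ : String) (halves : String) : Decidable (Pre_binary_search_str str_ halves) := by
  unfold Pre_binary_search_str; infer_instance

def pvWitness_binary_search_str : String × String := ("FB", "FB")

def Spec_binary_search_str (str_ : String) (halves : String) (out : Int) : Prop := out = binary_search_str_alt str_ halves
instance (str_ : String) (halves : String) (out : Int) : Decidable (Spec_binary_search_str str_ halves out) := by unfold Spec_binary_search_str; infer_instance

-- ===== CLAIM (what is proved, stated in full; the proofs are below) =====
def Claim_equal_binary_search_str : Prop := ∀ (str_ : String) (halves : String), Dom_binary_search_str str_ halves → Pre_binary_search_str str_ halves → Spec_binary_search_str str_ halves (binary_search_str str_ halves)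

-- ===== LEMMAS AND PROOFS =====

lemma pyGet?_str_zero (halves : String) (h0 : Char) (t : List Char)
    (h : halves.toList = h0 :: t) : PySem.Str.pyGet? halves 0 = some h0 := by
  have : ((0:Nat) : Int) = (0:Int) := rfl
  rw [← this, PySem.Str.pyGet?_natCast, h]; rfl

lemma pyGet?_str_one (halves : String) (h0 h1 : Char) (t : List Char)
    (h : halves.toList = h0 :: h1 :: t) : PySem.Str.pyGet? halves 1 = some h1 := by
  have : ((1:Nat) : Int) = (1:Int) := by norm_num
  rw [← this, PySem.Str.pyGet?_natCast, h]; rfl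

lemma aLoop_eq_bLoop (chars : List Char) (halves : String) (acc : Int)
    (hpre : ∀ c ∈ chars,
      (1 ≤ halves.toList.length ∧ c = halves.toList.headD ' ') ∨
      (2 ≤ halves.toList.length ∧ c = halves.toList.getD 1 ' ')) :
    aLoop chars halves
      (PySem.List.pyRange (acc * 2 ^ chars.length) ((acc + 1) * 2 ^ chars.length) 1)
      = some [bLoop chars halves acc] := by
  induction chars generalizing acc with
  | nil =>
      simp only [List.length_nil, pow_zero, mul_one, aLoop, bLoop]
      rw [PySem.List.pyRange_one_singleton]
  | cons c rest ih =>
      have hc := hpre c (List.mem_cons_self ..)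
      have hrest : ∀ x ∈ rest, _ := fun x hx => hpre x (List.mem_cons_of_mem _ hx)
      obtain ⟨h0, t, ht⟩ : ∃ h0 t, halves.toList = h0 :: t := by
        rcases hc with ⟨hl, _⟩ | ⟨hl, _⟩ <;>
        · cases hht : halves.toList with
          | nil => rw [hht] at hl; simp at hl
          | cons a b => exact ⟨a, b, rfl⟩
      set k := rest.length with hk
      have h2k : ((2:Int) ^ k) = ((2 ^ k : Nat) : Int) := by push_cast; ring
      have h2k1 : ((2:Int) ^ (k+1)) = ((2 ^ (k+1) : Nat) : Int) := by push_cast; ring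
      have hpos : (0:Int) < 2 ^ k := by positivity
      have hlenss : (PySem.List.pyRange (acc * 2 ^ (k+1)) ((acc + 1) * 2 ^ (k+1)) 1).length
          = 2 ^ (k+1) := by
        rw [PySem.List.length_pyRange_one,
          show (acc + 1) * 2 ^ (k+1) - acc * 2 ^ (k+1) = (2:Int) ^ (k+1) by ring,
          h2k1, Int.toNat_natCast]
      have hsplit : PySem.List.pyRange (acc * 2 ^ (k+1)) ((acc + 1) * 2 ^ (k+1)) 1
          = PySem.List.pyRange (acc * 2 ^ (k+1)) (acc * 2 ^ (k+1) + 2 ^ k) 1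
            ++ PySem.List.pyRange (acc * 2 ^ (k+1) + 2 ^ k) ((acc + 1) * 2 ^ (k+1)) 1 := by
        refine PySem.List.pyRange_one_append _ _ _ (by linarith) ?_
        have : (2:Int) ^ k + 2 ^ k = 2 ^ (k+1) := by ring
        nlinarith
      have hlen1 : (PySem.List.pyRange (acc * 2 ^ (k+1)) (acc * 2 ^ (k+1) + 2 ^ k) 1).length
          = 2 ^ k := by
        rw [PySem.List.length_pyRange_one, add_sub_cancel_left, h2k, Int.toNat_natCast]
      have hhalf : (2:Nat) ^ (k+1) / 2 = 2 ^ k := by rw [pow_succ]; omega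
      have htake : PySem.List.slice
            (PySem.List.pyRange (acc * 2 ^ (k+1)) ((acc + 1) * 2 ^ (k+1)) 1) none
            (some (((PySem.List.pyRange (acc * 2 ^ (k+1)) ((acc + 1) * 2 ^ (k+1)) 1).length / 2 : Nat) : Int))
          = PySem.List.pyRange (acc * 2 ^ (k+1)) (acc * 2 ^ (k+1) + 2 ^ k) 1 := by
        rw [PySem.List.slice_to_natCast, hlenss, hhalf, hsplit, List.take_left' hlen1]
      have hdrop : PySem.List.slice
            (PySem.List.pyRange (acc * 2 ^ (k+1)) ((acc + 1) * 2 ^ (k+1)) 1)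
            (some (((PySem.List.pyRange (acc * 2 ^ (k+1)) ((acc + 1) * 2 ^ (k+1)) 1).length / 2 : Nat) : Int)) none
          = PySem.List.pyRange (acc * 2 ^ (k+1) + 2 ^ k) ((acc + 1) * 2 ^ (k+1)) 1 := by
        rw [PySem.List.slice_from_natCast, hlenss, hhalf, hsplit, List.drop_left' hlen1]
      simp only [List.length_cons, aLoop, bLoop, pyGet?_str_zero halves h0 t ht]
      by_cases hc0 : c = h0
      · rw [if_pos hc0, if_pos hc0, htake]
        have := ih (acc * 2) hrest
        rw [show acc * 2 * 2 ^ k = acc * 2 ^ (k+1) by ring,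
            show (acc * 2 + 1) * 2 ^ k = acc * 2 ^ (k+1) + 2 ^ k by ring] at this
        exact this
      · have hcase2 : 2 ≤ halves.toList.length ∧ c = halves.toList.getD 1 ' ' := by
          rcases hc with ⟨_, hch⟩ | h2
          · exact absurd (by rw [ht] at hch; simpa using hch) hc0
          · exact h2
        obtain ⟨h1, t', ht2⟩ : ∃ h1 t', halves.toList = h0 :: h1 :: t' := by
          rcases hcase2 with ⟨hl, _⟩
          cases t with
          | nil => rw [ht] at hl; simp at hl
          | cons a b => exact ⟨a, b, ht⟩
        have hch1 : c = h1 := by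
          rcases hcase2 with ⟨_, hch⟩; rw [ht2] at hch; simpa using hch
        rw [if_neg hc0, if_neg hc0, pyGet?_str_one halves h0 h1 t' ht2]
        dsimp only
        rw [if_pos hch1, if_pos hch1, hdrop]
        have := ih (acc * 2 + 1) hrest
        rw [show (acc * 2 + 1) * 2 ^ k = acc * 2 ^ (k+1) + 2 ^ k by ring,
            show (acc * 2 + 1 + 1) * 2 ^ k = (acc + 1) * 2 ^ (k+1) by ring] at this
        exact this

theorem binary_search_str_spec : Claim_equal_binary_search_str := by
  intro str_ halves _hdom hpreb
  have hpre : ∀ c ∈ str_.toList,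
      (1 ≤ halves.toList.length ∧ c = halves.toList.headD ' ') ∨
      (2 ≤ halves.toList.length ∧ c = halves.toList.getD 1 ' ') := by
    unfold Pre_binary_search_str at hpreb
    simpa using hpreb
  unfold Spec_binary_search_str binary_search_str binary_search_str_alt
  have h := aLoop_eq_bLoop str_.toList halves 0 hpre
  simp only [zero_mul, zero_add, one_mul] at h
  rw [h]
  simp
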